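-- pv_equiv track=rewrite | github.com/smoothnlp/SmoothNLP | smoothnlp/algorithm/kg/extract.py | _get_rel_map
-- ===== SOURCE A (Python) =====
-- def _get_rel_map(struct):
--     rel_map = {}
--     rels = struct['dependencyRelationships']
--     for rel in rels:
--         if rel['dependentIndex'] in rel_map:
--             rel_map[rel['dependentIndex']].append(rel)
--         else:
--             rel_map[rel['dependentIndex']] = [rel]
--     return rel_map
-- ===== SOURCE B (Python) =====
-- def _get_rel_map(struct):
--     rels = struct['dependencyRelationships']
--     keys = list(dict.fromkeys(r['dependentIndex'] for r in rels))
--     return {k: [r for r in rels if r['dependentIndex'] == k] for k in keys}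
-- ===== Notes on version B (the rewrite author's own statement) =====
-- stated objective: alternative
-- what changed: Replaces the incremental append-or-create dict scan with two passes: an ordered dedup of the dependentIndex keys, then a per-key filter comprehension building each group.
import Mathlib
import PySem

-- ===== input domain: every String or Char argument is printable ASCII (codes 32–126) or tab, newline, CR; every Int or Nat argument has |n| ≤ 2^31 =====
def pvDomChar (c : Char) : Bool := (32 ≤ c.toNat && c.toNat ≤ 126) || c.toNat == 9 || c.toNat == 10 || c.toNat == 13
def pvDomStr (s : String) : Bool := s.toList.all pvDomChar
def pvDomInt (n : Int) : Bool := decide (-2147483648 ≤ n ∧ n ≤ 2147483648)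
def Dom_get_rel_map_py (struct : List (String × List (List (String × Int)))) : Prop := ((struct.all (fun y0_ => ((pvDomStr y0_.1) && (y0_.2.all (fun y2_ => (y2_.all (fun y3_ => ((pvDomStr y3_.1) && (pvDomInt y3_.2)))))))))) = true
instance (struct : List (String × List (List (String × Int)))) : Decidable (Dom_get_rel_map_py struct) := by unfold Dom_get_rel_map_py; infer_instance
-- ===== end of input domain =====

-- B groups via ordered key-dedup + per-key filter instead of A's append-or-create dict scan; equivalence of the two dicts (as insertion-ordered association lists) is proved on inputs where A raises no KeyError.

-- ===== PORT A =====
-- for rel in rels: if rel['dependentIndex'] in rel_map: rel_map[k].append(rel) else rel_map[k] = [rel]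
def get_rel_map_py (struct : List (String × List (List (String × Int)))) : List (Int × List (List (String × Int))) :=
  match PySem.Dict.get? (PySem.Dict.mk struct) "dependencyRelationships" with
  | none => []  -- KeyError; excluded by Pre_
  | some rels =>
    (rels.foldl (fun rel_map rel =>
      match PySem.Dict.get? (PySem.Dict.mk rel) "dependentIndex" with
      | none => rel_map  -- KeyError; excluded by Pre_
      | some k =>
        if rel_map.contains k then
          rel_map.insert k (rel_map.getD k [] ++ [rel])
        else
          rel_map.insert k [rel]) PySem.Dict.empty).items

-- ===== PORT B =====
-- rel['dependentIndex'] (KeyError excluded by Pre_), ported via getD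
def pvKeyOf (rel : List (String × Int)) : Int :=
  PySem.Dict.getD (PySem.Dict.mk rel) "dependentIndex" 0

-- keys = list(dict.fromkeys(...)); {k: [r for r in rels if r['dependentIndex'] == k] for k in keys}
def get_rel_map_py_alt (struct : List (String × List (List (String × Int)))) : List (Int × List (List (String × Int))) :=
  match PySem.Dict.get? (PySem.Dict.mk struct) "dependencyRelationships" with
  | none => []  -- KeyError; excluded by Pre_
  | some rels =>
    let keys := PySem.List.dedup (rels.map pvKeyOf)
    keys.map (fun k => (k, rels.filter (fun r => pvKeyOf r == k)))

-- ===== PRECONDITION & SPEC =====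
-- Pre_ excludes exactly the inputs where the Python raises KeyError: a struct without the
-- 'dependencyRelationships' key, or a relation without the 'dependentIndex' key.
def Pre_get_rel_map_py (struct : List (String × List (List (String × Int)))) : Prop :=
  (PySem.Dict.get? (PySem.Dict.mk struct) "dependencyRelationships").isSome = true ∧
  ∀ rel ∈ PySem.Dict.getD (PySem.Dict.mk struct) "dependencyRelationships" [],
    (PySem.Dict.get? (PySem.Dict.mk rel) "dependentIndex").isSome = true

instance (struct : List (String × List (List (String × Int)))) : Decidable (Pre_get_rel_map_py struct) := by unfold Pre_get_rel_map_py; infer_instance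

def pvWitness_get_rel_map_py : (List (String × List (List (String × Int)))) :=
  [("dependencyRelationships", [[("dependentIndex", 1)], [("dependentIndex", 0)], [("dependentIndex", 1)]])]

def Spec_get_rel_map_py (struct : List (String × List (List (String × Int)))) (out : List (Int × List (List (String × Int)))) : Prop := out = get_rel_map_py_alt struct
instance (struct : List (String × List (List (String × Int)))) (out : List (Int × List (List (String × Int)))) : Decidable (Spec_get_rel_map_py struct out) := by unfold Spec_get_rel_map_py; infer_instance

-- ===== CLAIM (what is proved, stated in full; the proofs are below) =====
def Claim_equal_get_rel_map_py : Prop := ∀ (struct : List (String × List (List (String × Int)))), Dom_get_rel_map_py struct → Pre_get_rel_map_py struct → Spec_get_rel_map_py struct (get_rel_map_py struct)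

-- ===== LEMMAS AND PROOFS =====

-- A's append-or-create step, on a relation that does carry the key, is a modify with default []
theorem pv_stepA_eq_modify (rel_map : PySem.Dict Int (List (List (String × Int))))
    (rel : List (String × Int))
    (h : (PySem.Dict.get? (PySem.Dict.mk rel) "dependentIndex").isSome = true) :
    (match PySem.Dict.get? (PySem.Dict.mk rel) "dependentIndex" with
      | none => rel_map
      | some k =>
        if rel_map.contains k then
          rel_map.insert k (rel_map.getD k [] ++ [rel])
        else
          rel_map.insert k [rel]) =
    rel_map.modify (pvKeyOf rel) [] (· ++ [rel]) := by
  obtain ⟨v, hv⟩ := Option.isSome_iff_exists.mp h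
  have hk : pvKeyOf rel = v := by
    simp [pvKeyOf, PySem.Dict.getD_of_get?_eq_some _ _ hv]
  rw [hv, hk]
  by_cases hc : rel_map.contains v = true
  · simp [hc]
    rfl
  · simp [Bool.not_eq_true] at hc
    simp [hc, PySem.Dict.modify, PySem.Dict.getD_of_not_contains _ _ hc]

-- the whole of A's loop, under Pre_, produces exactly B's dedup-then-filter dict
theorem pv_group_eq (rels : List (List (String × Int)))
    (h : ∀ rel ∈ rels, (PySem.Dict.get? (PySem.Dict.mk rel) "dependentIndex").isSome = true) :
    (rels.foldl (fun rel_map rel =>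
      match PySem.Dict.get? (PySem.Dict.mk rel) "dependentIndex" with
      | none => rel_map
      | some k =>
        if rel_map.contains k then
          rel_map.insert k (rel_map.getD k [] ++ [rel])
        else
          rel_map.insert k [rel]) PySem.Dict.empty).items =
    (PySem.List.dedup (rels.map pvKeyOf)).map
      (fun k => (k, rels.filter (fun r => pvKeyOf r == k))) := by
  rw [PySem.List.foldl_congr_mem _ _
      (fun rel_map rel => rel_map.modify (pvKeyOf rel) [] (· ++ [rel])) _
      (fun acc rel hrel => pv_stepA_eq_modify acc rel (h rel hrel))]
  have hnodup : ((rels.foldl (fun rel_map rel =>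
      rel_map.modify (pvKeyOf rel) [] (· ++ [rel])) PySem.Dict.empty).keys).Nodup := by
    exact PySem.Dict.nodup_keys_foldl_modify_key rels pvKeyOf []
      (fun _ rel => (· ++ [rel])) PySem.Dict.empty (by simp)
  rw [PySem.Dict.items_eq_map_keys _ hnodup []]
  have hkeys : (rels.foldl (fun rel_map rel =>
      rel_map.modify (pvKeyOf rel) [] (· ++ [rel])) PySem.Dict.empty).keys =
      PySem.List.dedup (rels.map pvKeyOf) := by
    rw [PySem.Dict.keys_foldl_modify_key rels pvKeyOf [] (fun _ rel => (· ++ [rel]))]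
    simp [PySem.List.dedup_eq_ofList, PySem.Set.update_nil_left, PySem.Dict.keys,
      PySem.Dict.empty]
  have hpairs : (rels.foldl (fun rel_map rel =>
      rel_map.modify (pvKeyOf rel) [] (· ++ [rel])) PySem.Dict.empty) =
      ((rels.map (fun r => (pvKeyOf r, r))).foldl
        (fun d p => d.modify p.1 [] (· ++ [p.2])) PySem.Dict.empty) := by
    rw [List.foldl_map]
  have hgetD : ∀ k, (rels.foldl (fun rel_map rel =>
      rel_map.modify (pvKeyOf rel) [] (· ++ [rel])) PySem.Dict.empty).getD k [] =
      rels.filter (fun r => pvKeyOf r == k) := by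
    intro k
    rw [hpairs, PySem.Dict.getD_foldl_modify_append]
    simp [List.filter_map, Function.comp_def]
  rw [hkeys]
  exact List.map_congr_left (fun k _ => by rw [hgetD k])

-- ===== VERDICT (by name: the statement is the Claim_ definition above) =====
theorem get_rel_map_py_spec : Claim_equal_get_rel_map_py := by
  intro struct _ hpre
  obtain ⟨h1, h2⟩ := hpre
  obtain ⟨rels, hrels⟩ := Option.isSome_iff_exists.mp h1
  rw [PySem.Dict.getD_of_get?_eq_some _ _ hrels] at h2
  unfold Spec_get_rel_map_py get_rel_map_py get_rel_map_py_alt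
  rw [hrels]
  exact pv_group_eq rels h2
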